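-- pv_equiv track=rewrite | github.com/MatrixTeam-AI/RAIN | src/modeling/engine_model.py | match_shape
-- ===== SOURCE A (Python) =====
-- def match_shape(a, b):
--     if(len(a) == len(b)):
--         return tuple(a) == tuple(b)
--     elif len(a) > len(b):
--         if(a[0] == 1):
--             return match_shape(a[1:], b)
--     else:
--         if(b[0] == 1):
--             return match_shape(a, b[1:])
--     return False
-- ===== SOURCE B (Python) =====
-- def match_shape(a, b):
--     d = len(a) - len(b)
--     if d == 0:
--         return tuple(a) == tuple(b)
--     if d > 0:
--         return all(x == 1 for x in a[:d]) and tuple(a[d:]) == tuple(b)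
--     return all(x == 1 for x in b[:-d]) and tuple(a) == tuple(b[-d:])
-- ===== Notes on version B (the rewrite author's own statement) =====
-- stated objective: simpler
-- what changed: Replaces the element-by-element recursion that strips one leading 1 per call with a single length-difference computation, one all-ones check on the surplus prefix and one tuple comparison.
import Mathlib
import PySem

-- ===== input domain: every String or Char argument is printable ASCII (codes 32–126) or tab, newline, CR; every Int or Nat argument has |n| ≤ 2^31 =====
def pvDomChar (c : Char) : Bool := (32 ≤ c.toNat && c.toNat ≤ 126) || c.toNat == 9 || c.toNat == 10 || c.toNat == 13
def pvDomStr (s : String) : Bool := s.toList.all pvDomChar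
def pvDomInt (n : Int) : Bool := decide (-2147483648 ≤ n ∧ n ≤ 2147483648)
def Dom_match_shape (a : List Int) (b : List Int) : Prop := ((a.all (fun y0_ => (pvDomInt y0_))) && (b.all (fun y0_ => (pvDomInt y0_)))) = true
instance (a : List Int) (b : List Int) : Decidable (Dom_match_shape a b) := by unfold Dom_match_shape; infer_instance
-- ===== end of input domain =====

-- B replaces A's strip-one-leading-1-per-call recursion with a single length-difference
-- computation, an all-ones check on the surplus prefix and one tuple comparison (simpler, one pass).

-- ===== PORT A =====
-- A recurses, dropping the head of the longer list while it is 1; the head access a[0]/b[0]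
-- is safe (the longer list is nonempty), so the pattern match is exact.
def match_shape (a : List Int) (b : List Int) : Bool :=
  if a.length = b.length then a == b
  else if a.length > b.length then
    match a with
    | x :: rest => if x == 1 then match_shape rest b else false
    | [] => false
  else
    match b with
    | y :: rest => if y == 1 then match_shape a rest else false
    | [] => false
termination_by a.length + b.length
decreasing_by all_goals simp_all

-- ===== PORT B =====
-- a[:d]/a[d:] with 0 < d ≤ len(a) are exactly take/drop of d.toNat; likewise b[:-d]/b[-d:] for d < 0.
def match_shape_alt (a : List Int) (b : List Int) : Bool :=
  let d : Int := (a.length : Int) - (b.length : Int)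
  if d = 0 then a == b
  else if d > 0 then (a.take d.toNat).all (· == 1) && (a.drop d.toNat == b)
  else (b.take (-d).toNat).all (· == 1) && (a == b.drop (-d).toNat)

-- ===== PRECONDITION & SPEC =====
def Spec_match_shape (a : List Int) (b : List Int) (out : Bool) : Prop := out = match_shape_alt a b
instance (a : List Int) (b : List Int) (out : Bool) : Decidable (Spec_match_shape a b out) := by unfold Spec_match_shape; infer_instance

-- ===== CLAIM (what is proved, stated in full; the proofs are below) =====
def Claim_equal_match_shape : Prop := ∀ (a : List Int) (b : List Int), Dom_match_shape a b → Spec_match_shape a b (match_shape a b)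

-- ===== LEMMAS AND PROOFS =====
lemma alt_cons_left (x : Int) (rest b : List Int) (h : b.length < rest.length + 1) :
    match_shape_alt (x :: rest) b = ((x == 1) && match_shape_alt rest b) := by
  simp only [match_shape_alt, List.length_cons]
  have hd : ((rest.length + 1 : Nat) : Int) - b.length ≠ 0 := by omega
  have hd' : ((rest.length + 1 : Nat) : Int) - b.length > 0 := by push_cast; omega
  rw [if_neg hd, if_pos hd']
  by_cases hz : rest.length = b.length
  · have h1 : (((rest.length + 1 : Nat) : Int) - b.length).toNat = 1 := by omega
    have h0 : ((rest.length : Int) - b.length) = 0 := by omega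
    rw [h1, if_pos h0]
    simp
  · have hgt : ((rest.length : Int) - b.length) > 0 := by push_cast; omega
    have h1 : (((rest.length + 1 : Nat) : Int) - b.length).toNat
        = ((rest.length : Int) - b.length).toNat + 1 := by omega
    rw [h1, if_neg (by push_cast; omega), if_pos hgt]
    simp [List.take_succ_cons, List.drop_succ_cons, Bool.and_assoc]

lemma alt_cons_right (a : List Int) (y : Int) (rest : List Int) (h : a.length < rest.length + 1) :
    match_shape_alt a (y :: rest) = ((y == 1) && match_shape_alt a rest) := by
  simp only [match_shape_alt, List.length_cons]
  have hd : (a.length : Int) - ((rest.length + 1 : Nat) : Int) ≠ 0 := by omega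
  have hd' : ¬ ((a.length : Int) - ((rest.length + 1 : Nat) : Int) > 0) := by push_cast; omega
  rw [if_neg hd, if_neg hd']
  by_cases hz : a.length = rest.length
  · have h1 : (-((a.length : Int) - ((rest.length + 1 : Nat) : Int))).toNat = 1 := by omega
    have h0 : ((a.length : Int) - rest.length) = 0 := by omega
    rw [h1, if_pos h0]
    simp
  · have hlt : ¬ ((a.length : Int) - rest.length > 0) := by omega
    have h1 : (-((a.length : Int) - ((rest.length + 1 : Nat) : Int))).toNat
        = (-((a.length : Int) - (rest.length : Int))).toNat + 1 := by omega
    rw [h1, if_neg (by push_cast; omega), if_neg hlt]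
    simp [List.take_succ_cons, List.drop_succ_cons, Bool.and_assoc]

lemma key (a b : List Int) : match_shape a b = match_shape_alt a b := by
  fun_induction match_shape a b with
  | case1 a b heq => simp [match_shape_alt, heq]
  | case2 b x rest hx heq hgt ih =>
    rw [alt_cons_left x rest b (by simpa using hgt)]
    simp_all
  | case3 b x rest hx heq hgt =>
    rw [alt_cons_left x rest b (by simpa using hgt)]
    simp_all
  | case4 b heq hgt => simp at hgt
  | case5 a x rest hx heq hgt ih =>
    rw [alt_cons_right a x rest (by simp at heq hgt ⊢; omega)]
    simp_all
  | case6 a x rest hx heq hgt =>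
    rw [alt_cons_right a x rest (by simp at heq hgt ⊢; omega)]
    simp_all
  | case7 a heq hgt => exfalso; simp_all

-- ===== VERDICT (by name: the statement is the Claim_ definition above) =====
theorem match_shape_spec : Claim_equal_match_shape := by
  intro a b _
  unfold Spec_match_shape
  exact key a b
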